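-- pv_equiv track=rewrite | github.com/aica-wavelab/aica-assignments | A4_melody_generation/encoder.py | take_notes
-- ===== SOURCE A (Python) =====
-- HOLD_SYMBOL = '_'
--
-- def take_notes(melody: list[str], n_notes: int) -> list[str]:
--     part = []
--     note_count = 0
--     for symbol in melody:
--
--         if symbol != HOLD_SYMBOL:
--             if note_count >= n_notes:
--                 break
--             note_count += 1
--         part.append(symbol)
--
--     return part
-- ===== SOURCE B (Python) =====
-- HOLD_SYMBOL = '_'
--
-- def take_notes(melody: list[str], n_notes: int) -> list[str]:
--     indices = [i for i, s in enumerate(melody) if s != HOLD_SYMBOL]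
--     k = max(n_notes, 0)
--     if len(indices) > k:
--         return melody[:indices[k]]
--     return melody[:]
-- ===== Notes on version B (the rewrite author's own statement) =====
-- stated objective: simpler
-- what changed: Replaces the stateful streaming loop (counter + break) with an index table of non-hold positions plus a single slice up to the (k+1)-th non-hold symbol.
import Mathlib
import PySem

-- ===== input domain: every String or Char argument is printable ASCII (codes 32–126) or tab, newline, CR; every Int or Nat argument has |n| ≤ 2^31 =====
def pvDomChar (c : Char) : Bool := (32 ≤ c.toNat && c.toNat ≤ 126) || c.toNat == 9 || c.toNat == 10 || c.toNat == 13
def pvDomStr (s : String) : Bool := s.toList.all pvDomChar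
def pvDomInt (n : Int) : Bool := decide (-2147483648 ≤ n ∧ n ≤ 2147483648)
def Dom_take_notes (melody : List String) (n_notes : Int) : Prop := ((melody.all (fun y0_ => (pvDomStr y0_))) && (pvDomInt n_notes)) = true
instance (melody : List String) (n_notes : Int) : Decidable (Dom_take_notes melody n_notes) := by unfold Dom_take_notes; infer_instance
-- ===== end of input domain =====

-- B replaces A's stateful streaming loop (counter + break) with an index table of
-- non-hold positions plus one slice (objective: simpler decomposition, same cost).


-- ===== PORT A =====
-- the for-loop with break: note_count threading, branch order as in the Python
def take_notes_loop (melody : List String) (n_notes : Int) (note_count : Int) : List String :=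
  match melody with
  | [] => []
  | symbol :: rest =>
    if symbol ≠ "_" then
      if note_count ≥ n_notes then []   -- break
      else symbol :: take_notes_loop rest n_notes (note_count + 1)
    else symbol :: take_notes_loop rest n_notes note_count

def take_notes (melody : List String) (n_notes : Int) : List String :=
  take_notes_loop melody n_notes 0

-- ===== PORT B =====
def take_notes_alt (melody : List String) (n_notes : Int) : List String :=
  let indices := ((PySem.List.enumerate melody 0).filter (fun p => p.2 ≠ "_")).map (·.1)
  let k := max n_notes 0
  if (indices.length : Int) > k then
    PySem.List.slice melody none (some (PySem.List.pyGetD indices k 0))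
  else
    melody

-- ===== PRECONDITION & SPEC =====
def Spec_take_notes (melody : List String) (n_notes : Int) (out : List String) : Prop := out = take_notes_alt melody n_notes
instance (melody : List String) (n_notes : Int) (out : List String) : Decidable (Spec_take_notes melody n_notes out) := by unfold Spec_take_notes; infer_instance

-- ===== CLAIM (what is proved, stated in full; the proofs are below) =====
def Claim_equal_take_notes : Prop := ∀ (melody : List String) (n_notes : Int), Dom_take_notes melody n_notes → Spec_take_notes melody n_notes (take_notes melody n_notes)

-- ===== LEMMAS AND PROOFS =====

-- common reference form: take the prefix allowing b non-hold symbols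
def takeAux : List String → Nat → List String
  | [], _ => []
  | s :: rest, b =>
    if s = "_" then s :: takeAux rest b
    else match b with
         | 0 => []
         | Nat.succ b' => s :: takeAux rest b'

-- positions (as Ints, starting from t) of non-hold symbols
def nidxZ : List String → Int → List Int
  | [], _ => []
  | s :: rest, t => if s = "_" then nidxZ rest (t + 1) else t :: nidxZ rest (t + 1)

lemma loop_eq_takeAux (melody : List String) (n c : Int) :
    take_notes_loop melody n c = takeAux melody (n - c).toNat := by
  induction melody generalizing c with
  | nil => rfl
  | cons s rest ih =>
    by_cases hs : s = "_"
    · simp [take_notes_loop, takeAux, hs, ih]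
    · by_cases hc : c ≥ n
      · have : (n - c).toNat = 0 := by omega
        simp [take_notes_loop, takeAux, hs, hc, this]
      · have hb : (n - c).toNat = (n - (c + 1)).toNat + 1 := by omega
        simp [take_notes_loop, takeAux, hs, hc, hb, ih]

lemma enum_idx (melody : List String) (t : Int) :
    ((PySem.List.enumerate melody t).filter (fun p => p.2 ≠ "_")).map (·.1) = nidxZ melody t := by
  induction melody generalizing t with
  | nil => rfl
  | cons x rest ih =>
    by_cases hx : x = "_" <;>
      · simp [PySem.List.enumerate_cons, nidxZ, hx]
        simpa using ih (t + 1)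

lemma nidxZ_nonneg (melody : List String) (t : Int) (ht : 0 ≤ t) :
    ∀ x ∈ nidxZ melody t, t ≤ x := by
  induction melody generalizing t with
  | nil => simp [nidxZ]
  | cons s rest ih =>
    intro x hx
    by_cases hs : s = "_"
    · simp only [nidxZ, if_pos hs] at hx
      have := ih (t + 1) (by omega) x hx; omega
    · simp only [nidxZ, if_neg hs, List.mem_cons] at hx
      rcases hx with rfl | hx
      · omega
      · have := ih (t + 1) (by omega) x hx; omega

lemma take_nidxZ_eq_takeAux (melody : List String) (t : Int) (ht : 0 ≤ t) (b : Nat)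
    (hb : b < (nidxZ melody t).length) :
    melody.take (((nidxZ melody t)[b] - t).toNat) = takeAux melody b := by
  induction melody generalizing t b with
  | nil => simp [nidxZ] at hb
  | cons s rest ih =>
    by_cases hs : s = "_"
    · have hb' : b < (nidxZ rest (t + 1)).length := by simpa [nidxZ, hs] using hb
      have hx : t + 1 ≤ (nidxZ rest (t + 1))[b] := by
        exact nidxZ_nonneg rest (t + 1) (by omega) _ (List.getElem_mem _)
      have harith : ((nidxZ rest (t + 1))[b] - t).toNat = ((nidxZ rest (t + 1))[b] - (t + 1)).toNat + 1 := by
        omega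
      simp [nidxZ, hs, takeAux, harith, List.take_succ_cons, ih (t + 1) (by omega) b hb']
    · cases b with
      | zero => simp [nidxZ, hs, takeAux]
      | succ b' =>
        have hb' : b' < (nidxZ rest (t + 1)).length := by simpa [nidxZ, hs] using hb
        have hx : t + 1 ≤ (nidxZ rest (t + 1))[b'] := by
          exact nidxZ_nonneg rest (t + 1) (by omega) _ (List.getElem_mem _)
        have harith : ((nidxZ rest (t + 1))[b'] - t).toNat = ((nidxZ rest (t + 1))[b'] - (t + 1)).toNat + 1 := by
          omega
        simp [nidxZ, hs, takeAux, harith, List.take_succ_cons, ih (t + 1) (by omega) b' hb']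

lemma full_eq_takeAux (melody : List String) (t : Int) (b : Nat)
    (hb : (nidxZ melody t).length ≤ b) :
    melody = takeAux melody b := by
  induction melody generalizing t b with
  | nil => rfl
  | cons s rest ih =>
    by_cases hs : s = "_"
    · have hb' : (nidxZ rest (t + 1)).length ≤ b := by simpa [nidxZ, hs] using hb
      simp [takeAux, hs]; exact ih (t + 1) b hb'
    · cases b with
      | zero => simp [nidxZ, hs] at hb
      | succ b' =>
        have hb' : (nidxZ rest (t + 1)).length ≤ b' := by simpa [nidxZ, hs] using hb
        simp [takeAux, hs]; exact ih (t + 1) b' hb'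

lemma alt_def (melody : List String) (n : Int) :
    take_notes_alt melody n =
      (if ((((PySem.List.enumerate melody 0).filter (fun p => p.2 ≠ "_")).map (·.1)).length : Int) > max n 0 then
        PySem.List.slice melody none
          (some (PySem.List.pyGetD (((PySem.List.enumerate melody 0).filter (fun p => p.2 ≠ "_")).map (·.1)) (max n 0) 0))
      else melody) := rfl

lemma alt_eq_takeAux (melody : List String) (n : Int) :
    take_notes_alt melody n = takeAux melody n.toNat := by
  rw [alt_def, enum_idx]
  by_cases h : n.toNat < (nidxZ melody 0).length
  · have hgt : ((nidxZ melody 0).length : Int) > max n 0 := by omega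
    have hmem : (nidxZ melody 0)[n.toNat] ∈ nidxZ melody 0 := List.getElem_mem _
    have hnn : 0 ≤ (nidxZ melody 0)[n.toNat] := nidxZ_nonneg melody 0 le_rfl _ hmem
    have hidx : PySem.List.pyGetD (nidxZ melody 0) (max n 0) 0 = (nidxZ melody 0)[n.toNat] := by
      rw [PySem.List.pyGetD_eq_getElem _ 0 (le_max_right _ _) (by simpa using hgt)]
      congr 1; omega
    rw [if_pos hgt, hidx, PySem.List.slice_to _ hnn]
    have := take_nidxZ_eq_takeAux melody 0 le_rfl n.toNat h
    simpa using this
  · rw [if_neg (by omega)]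
    exact full_eq_takeAux melody 0 n.toNat (by omega)

-- ===== VERDICT (by name: the statement is the Claim_ definition above) =====
theorem take_notes_spec : Claim_equal_take_notes := by
  intro melody n _
  show take_notes melody n = take_notes_alt melody n
  rw [take_notes, loop_eq_takeAux, alt_eq_takeAux]
  norm_num
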